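-- pv_equiv track=rewrite | github.com/techarek/Shopping | process_image/barcode_reader.py | get_closest_codes
-- ===== SOURCE A (Python) =====
-- BARCODE_CONVERSION = {3211: 0,2221: 1, 2122: 2, 1411: 3, 1132: 4, 1231: 5, 1114: 6, 1312: 7, 1213: 8, 3112: 9}
--
-- def get_closest_codes(num):
-- 	min_dist = 16
-- 	closest_codes = []
-- 	for code in BARCODE_CONVERSION.keys():
-- 		distance = sum([abs(int(n)-int(m)) for n,m in zip(str(code),str(num))])
-- 		if distance < min_dist:
-- 			closest_codes = [code]
-- 			min_dist = distance
-- 		elif distance == min_dist: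
-- 			closest_codes.append(code)
--
-- 	return [BARCODE_CONVERSION[code] for code in closest_codes]
-- ===== SOURCE B (Python) =====
-- BARCODE_CONVERSION = {3211: 0, 2221: 1, 2122: 2, 1411: 3, 1132: 4, 1231: 5, 1114: 6, 1312: 7, 1213: 8, 3112: 9}
--
-- def get_closest_codes(num):
-- 	s = str(num)
-- 	table = [(value, sum(abs(int(a) - int(b)) for a, b in zip(str(code), s)))
-- 	         for code, value in BARCODE_CONVERSION.items()]
-- 	best = min(d for _, d in table)
-- 	if best > 16:
-- 		return []
-- 	return [v for v, d in table if d == best]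
-- ===== Notes on version B (the rewrite author's own statement) =====
-- stated objective: alternative
-- what changed: Replaces A's single running-min loop with mutable state (reset list / append on tie) by a build-table-then-two-passes decomposition: compute all (value, distance) pairs once, take best = min of the distances, then filter the table for entries at that distance (keeping A's distance-16 cutoff, above which nothing qualifies).
import Mathlib
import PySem

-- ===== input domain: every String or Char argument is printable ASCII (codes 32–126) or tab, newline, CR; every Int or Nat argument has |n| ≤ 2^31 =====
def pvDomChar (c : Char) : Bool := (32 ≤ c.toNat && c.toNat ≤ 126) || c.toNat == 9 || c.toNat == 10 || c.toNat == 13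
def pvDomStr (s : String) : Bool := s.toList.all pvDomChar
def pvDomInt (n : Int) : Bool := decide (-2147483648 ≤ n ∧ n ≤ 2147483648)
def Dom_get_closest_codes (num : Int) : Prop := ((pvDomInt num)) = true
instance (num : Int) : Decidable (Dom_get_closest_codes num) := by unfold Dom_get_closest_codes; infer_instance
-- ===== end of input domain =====

-- B replaces A's running-min loop by a build-(value,distance)-table, min, filter decomposition; same cost.


-- ===== PORT A =====
-- the module-level BARCODE_CONVERSION dict
def pvBC : PySem.Dict Int Int :=
  PySem.Dict.ofList [(3211, 0), (2221, 1), (2122, 2), (1411, 3), (1132, 4),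
                     (1231, 5), (1114, 6), (1312, 7), (1213, 8), (3112, 9)]

-- int(c) for a single digit character; exact on digit chars (Pre_ excludes negative num,
-- so every zipped character of str(code)/str(num) is a digit)
def pvDigit (c : Char) : Int := (c.toNat : Int) - 48

-- sum([abs(int(n)-int(m)) for n,m in zip(str(code), s)])
def pvDist (code : Int) (s : String) : Int :=
  (((PySem.Int.toStr code).toList.zip s.toList).map
      (fun p => |pvDigit p.1 - pvDigit p.2|)).sum

def get_closest_codes (num : Int) : List Int :=
  let st := pvBC.keys.foldl
    (fun (st : Int × List Int) code =>
      let d := pvDist code (PySem.Int.toStr num)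
      if d < st.1 then (d, [code])
      else if d = st.1 then (st.1, st.2 ++ [code])
      else st)
    ((16 : Int), ([] : List Int))
  st.2.map (fun code => pvBC.getD code 0)   -- BARCODE_CONVERSION[code]; every code comes from the dict, so the lookup succeeds

-- ===== PORT B =====
def get_closest_codes_alt (num : Int) : List Int :=
  let s := PySem.Int.toStr num
  let table := pvBC.items.map (fun kv => (kv.2, pvDist kv.1 s))
  let best := (PySem.List.min? (table.map Prod.snd) (fun d => d)).getD 0   -- table is never empty, so min() succeeds
  if 16 < best then []
  else table.filterMap (fun vd => if vd.2 = best then some vd.1 else none)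

-- ===== PRECONDITION & SPEC =====
-- Pre_ excludes negative num: there str(num) starts with '-' and A raises ValueError at int('-').
def Pre_get_closest_codes (num : Int) : Prop := 0 ≤ num
instance (num : Int) : Decidable (Pre_get_closest_codes num) := by unfold Pre_get_closest_codes; infer_instance
def pvWitness_get_closest_codes : Int := 1234

def Spec_get_closest_codes (num : Int) (out : List Int) : Prop := out = get_closest_codes_alt num
instance (num : Int) (out : List Int) : Decidable (Spec_get_closest_codes num out) := by unfold Spec_get_closest_codes; infer_instance

-- ===== CLAIM (what is proved, stated in full; the proofs are below) =====
def Claim_equal_get_closest_codes : Prop := ∀ (num : Int), Dom_get_closest_codes num → Pre_get_closest_codes num → Spec_get_closest_codes num (get_closest_codes num)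

-- ===== LEMMAS AND PROOFS =====

-- A's loop body as a step function over (code, distance) pairs
def pvStep (st : Int × List Int) (cd : Int × Int) : Int × List Int :=
  if cd.2 < st.1 then (cd.2, [cd.1])
  else if cd.2 = st.1 then (st.1, st.2 ++ [cd.1])
  else st

def pvMinD (l : List (Int × Int)) (m : Int) : Int :=
  l.foldl (fun a cd => min a cd.2) m

lemma pvMinD_le (l : List (Int × Int)) (m : Int) : pvMinD l m ≤ m := by
  induction l generalizing m with
  | nil => simp [pvMinD]
  | cons h t ih =>
      calc pvMinD (h :: t) m = pvMinD t (min m h.2) := rfl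
        _ ≤ min m h.2 := ih _
        _ ≤ m := min_le_left _ _

lemma pvRunMin (l : List (Int × Int)) (m : Int) (acc : List Int) :
    List.foldl pvStep (m, acc) l =
      (pvMinD l m,
       (if pvMinD l m = m then acc else []) ++
         l.filterMap (fun cd => if cd.2 = pvMinD l m then some cd.1 else none)) := by
  induction l generalizing m acc with
  | nil => simp [pvMinD]
  | cons h t ih =>
      have hM : pvMinD (h :: t) m = pvMinD t (min m h.2) := rfl
      have hle : pvMinD t (min m h.2) ≤ min m h.2 := pvMinD_le _ _
      rw [List.foldl_cons, hM]
      by_cases h1 : h.2 < m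
      · have hstep : pvStep (m, acc) h = (h.2, [h.1]) := by
          simp [pvStep, h1]
        rw [hstep, ih]
        have hmin : min m h.2 = h.2 := by omega
        rw [hmin]
        have hne : pvMinD t h.2 ≠ m := by have := pvMinD_le t h.2; omega
        simp [List.filterMap_cons, hne]
        rcases eq_or_ne (pvMinD t h.2) h.2 with he | he
        · simp [he]
        · simp [he, Ne.symm he]
      · by_cases h2 : h.2 = m
        · have hstep : pvStep (m, acc) h = (m, acc ++ [h.1]) := by
            simp [pvStep, h2]
          rw [hstep, ih]
          have hmin : min m h.2 = m := by omega
          rw [hmin]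
          rcases eq_or_ne (pvMinD t m) m with he | he
          · simp [he, h2]
          · simp [he, h2, Ne.symm he]
        · have hstep : pvStep (m, acc) h = (m, acc) := by
            simp [pvStep, h1, h2]
          rw [hstep, ih]
          have hmin : min m h.2 = m := by omega
          rw [hmin]
          have hne : h.2 ≠ pvMinD t m := by have := pvMinD_le t m; omega
          simp [hne]

lemma pvFoldA_eq (s : String) (codes : List Int) (st0 : Int × List Int) :
    codes.foldl
      (fun (st : Int × List Int) code =>
        let d := pvDist code s
        if d < st.1 then (d, [code])
        else if d = st.1 then (st.1, st.2 ++ [code])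
        else st) st0
    = List.foldl pvStep st0 (codes.map (fun c => (c, pvDist c s))) := by
  rw [List.foldl_map]
  rfl

set_option maxHeartbeats 2000000 in
theorem get_closest_codes_spec : Claim_equal_get_closest_codes := by
  intro num _ _
  unfold Spec_get_closest_codes get_closest_codes get_closest_codes_alt
  have hK : pvBC.keys = [3211,2221,2122,1411,1132,1231,1114,1312,1213,3112] := by decide
  have hI : pvBC.items = [(3211,0),(2221,1),(2122,2),(1411,3),(1132,4),(1231,5),(1114,6),(1312,7),(1213,8),(3112,9)] := by decide
  simp only [hK, hI, pvFoldA_eq, pvRunMin, List.map_cons, List.map_nil]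
  generalize pvDist 3211 (PySem.Int.toStr num) = e1
  generalize pvDist 2221 (PySem.Int.toStr num) = e2
  generalize pvDist 2122 (PySem.Int.toStr num) = e3
  generalize pvDist 1411 (PySem.Int.toStr num) = e4
  generalize pvDist 1132 (PySem.Int.toStr num) = e5
  generalize pvDist 1231 (PySem.Int.toStr num) = e6
  generalize pvDist 1114 (PySem.Int.toStr num) = e7
  generalize pvDist 1312 (PySem.Int.toStr num) = e8
  generalize pvDist 1213 (PySem.Int.toStr num) = e9
  generalize pvDist 3112 (PySem.Int.toStr num) = e10
  simp only [pvMinD, List.foldl_cons, List.foldl_nil, PySem.List.min?_id_cons, Option.getD_some]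
  have hMB : min (min (min (min (min (min (min (min (min (min 16 e1) e2) e3) e4) e5) e6) e7) e8) e9) e10 = min 16 (min (min (min (min (min (min (min (min (min e1 e2) e3) e4) e5) e6) e7) e8) e9) e10) := by ac_rfl
  simp only [hMB]
  by_cases hb : (16:Int) < (min (min (min (min (min (min (min (min (min e1 e2) e3) e4) e5) e6) e7) e8) e9) e10)
  · rw [if_pos hb]
    have hM16 : min 16 (min (min (min (min (min (min (min (min (min e1 e2) e3) e4) e5) e6) e7) e8) e9) e10) = (16:Int) := min_eq_left (le_of_lt hb)
    simp only [hM16]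
    have u8 : (min (min (min (min (min (min (min (min (min e1 e2) e3) e4) e5) e6) e7) e8) e9) e10) ≤ (min (min (min (min (min (min (min (min e1 e2) e3) e4) e5) e6) e7) e8) e9) := min_le_left _ _
    have u7 : (min (min (min (min (min (min (min (min (min e1 e2) e3) e4) e5) e6) e7) e8) e9) e10) ≤ (min (min (min (min (min (min (min e1 e2) e3) e4) e5) e6) e7) e8) := le_trans u8 (min_le_left _ _)
    have u6 : (min (min (min (min (min (min (min (min (min e1 e2) e3) e4) e5) e6) e7) e8) e9) e10) ≤ (min (min (min (min (min (min e1 e2) e3) e4) e5) e6) e7) := le_trans u7 (min_le_left _ _)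
    have u5 : (min (min (min (min (min (min (min (min (min e1 e2) e3) e4) e5) e6) e7) e8) e9) e10) ≤ (min (min (min (min (min e1 e2) e3) e4) e5) e6) := le_trans u6 (min_le_left _ _)
    have u4 : (min (min (min (min (min (min (min (min (min e1 e2) e3) e4) e5) e6) e7) e8) e9) e10) ≤ (min (min (min (min e1 e2) e3) e4) e5) := le_trans u5 (min_le_left _ _)
    have u3 : (min (min (min (min (min (min (min (min (min e1 e2) e3) e4) e5) e6) e7) e8) e9) e10) ≤ (min (min (min e1 e2) e3) e4) := le_trans u4 (min_le_left _ _)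
    have u2 : (min (min (min (min (min (min (min (min (min e1 e2) e3) e4) e5) e6) e7) e8) e9) e10) ≤ (min (min e1 e2) e3) := le_trans u3 (min_le_left _ _)
    have u1 : (min (min (min (min (min (min (min (min (min e1 e2) e3) e4) e5) e6) e7) e8) e9) e10) ≤ (min e1 e2) := le_trans u2 (min_le_left _ _)
    have q1 : (min (min (min (min (min (min (min (min (min e1 e2) e3) e4) e5) e6) e7) e8) e9) e10) ≤ e1 := le_trans u1 (min_le_left _ _)
    have q2 : (min (min (min (min (min (min (min (min (min e1 e2) e3) e4) e5) e6) e7) e8) e9) e10) ≤ e2 := le_trans u1 (min_le_right _ _)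
    have q3 : (min (min (min (min (min (min (min (min (min e1 e2) e3) e4) e5) e6) e7) e8) e9) e10) ≤ e3 := le_trans u2 (min_le_right _ _)
    have q4 : (min (min (min (min (min (min (min (min (min e1 e2) e3) e4) e5) e6) e7) e8) e9) e10) ≤ e4 := le_trans u3 (min_le_right _ _)
    have q5 : (min (min (min (min (min (min (min (min (min e1 e2) e3) e4) e5) e6) e7) e8) e9) e10) ≤ e5 := le_trans u4 (min_le_right _ _)
    have q6 : (min (min (min (min (min (min (min (min (min e1 e2) e3) e4) e5) e6) e7) e8) e9) e10) ≤ e6 := le_trans u5 (min_le_right _ _)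
    have q7 : (min (min (min (min (min (min (min (min (min e1 e2) e3) e4) e5) e6) e7) e8) e9) e10) ≤ e7 := le_trans u6 (min_le_right _ _)
    have q8 : (min (min (min (min (min (min (min (min (min e1 e2) e3) e4) e5) e6) e7) e8) e9) e10) ≤ e8 := le_trans u7 (min_le_right _ _)
    have q9 : (min (min (min (min (min (min (min (min (min e1 e2) e3) e4) e5) e6) e7) e8) e9) e10) ≤ e9 := le_trans u8 (min_le_right _ _)
    have q10 : (min (min (min (min (min (min (min (min (min e1 e2) e3) e4) e5) e6) e7) e8) e9) e10) ≤ e10 := min_le_right _ _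
    have h1 : e1 ≠ (16:Int) := ne_of_gt (lt_of_lt_of_le hb q1)
    have h2 : e2 ≠ (16:Int) := ne_of_gt (lt_of_lt_of_le hb q2)
    have h3 : e3 ≠ (16:Int) := ne_of_gt (lt_of_lt_of_le hb q3)
    have h4 : e4 ≠ (16:Int) := ne_of_gt (lt_of_lt_of_le hb q4)
    have h5 : e5 ≠ (16:Int) := ne_of_gt (lt_of_lt_of_le hb q5)
    have h6 : e6 ≠ (16:Int) := ne_of_gt (lt_of_lt_of_le hb q6)
    have h7 : e7 ≠ (16:Int) := ne_of_gt (lt_of_lt_of_le hb q7)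
    have h8 : e8 ≠ (16:Int) := ne_of_gt (lt_of_lt_of_le hb q8)
    have h9 : e9 ≠ (16:Int) := ne_of_gt (lt_of_lt_of_le hb q9)
    have h10 : e10 ≠ (16:Int) := ne_of_gt (lt_of_lt_of_le hb q10)
    simp [h1, h2, h3, h4, h5, h6, h7, h8, h9, h10]
  · rw [if_neg hb]
    have hM : min 16 (min (min (min (min (min (min (min (min (min e1 e2) e3) e4) e5) e6) e7) e8) e9) e10) = (min (min (min (min (min (min (min (min (min e1 e2) e3) e4) e5) e6) e7) e8) e9) e10) := min_eq_right (not_lt.mp hb)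
    simp only [hM]
    have g1 : pvBC.getD 3211 0 = 0 := by decide
    have g2 : pvBC.getD 2221 0 = 1 := by decide
    have g3 : pvBC.getD 2122 0 = 2 := by decide
    have g4 : pvBC.getD 1411 0 = 3 := by decide
    have g5 : pvBC.getD 1132 0 = 4 := by decide
    have g6 : pvBC.getD 1231 0 = 5 := by decide
    have g7 : pvBC.getD 1114 0 = 6 := by decide
    have g8 : pvBC.getD 1312 0 = 7 := by decide
    have g9 : pvBC.getD 1213 0 = 8 := by decide
    have g10 : pvBC.getD 3112 0 = 9 := by decide
    have hmap : [((0:Int), e1), (1, e2), (2, e3), (3, e4), (4, e5), (5, e6), (6, e7), (7, e8), (8, e9), (9, e10)]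
        = List.map (fun cd : Int × Int => (pvBC.getD cd.1 0, cd.2))
            [((3211:Int), e1), (2221, e2), (2122, e3), (1411, e4), (1132, e5), (1231, e6), (1114, e7), (1312, e8), (1213, e9), (3112, e10)] := by
      simp [List.map_cons, g1, g2, g3, g4, g5, g6, g7, g8, g9, g10]
    rw [hmap, List.filterMap_map, ite_self, List.nil_append, List.map_filterMap]
    congr 1
    funext cd
    by_cases h : cd.2 = (min (min (min (min (min (min (min (min (min e1 e2) e3) e4) e5) e6) e7) e8) e9) e10) <;> simp [h]
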